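-- pv_equiv track=rewrite | github.com/vanishh/python-demo | question/codewars.py | draw_square
-- ===== SOURCE A (Python) =====
-- def draw_square(size):
--     box = ""
--     if size == 0:
--         return box
--     if size == 1:
--         return "#"
--     if size == 2:
--         return "##\n##"
--     if size > 2:
--         for index in range(3,size+1):
--             box += "#" + " " * (size-2) + "#\n"
--         box = "#" * size + "\n" + box + "#" * size
--     return box
-- ===== SOURCE B (Python) =====
-- def draw_square(size):
--     rows = []
--     for i in range(size):
--         if i == 0 or i == size - 1:
--             rows.append("#" * size)
--         else:
--             rows.append("#" + " " * (size - 2) + "#")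
--     return "\n".join(rows)
-- ===== Notes on version B (the rewrite author's own statement) =====
-- stated objective: simpler
-- what changed: Replaced A's early-return special cases for the smallest sizes plus an interior-only loop and final top/bottom concatenation with one uniform pass over all row indices that picks each row's shape by position, joined with newlines.
import Mathlib
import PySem

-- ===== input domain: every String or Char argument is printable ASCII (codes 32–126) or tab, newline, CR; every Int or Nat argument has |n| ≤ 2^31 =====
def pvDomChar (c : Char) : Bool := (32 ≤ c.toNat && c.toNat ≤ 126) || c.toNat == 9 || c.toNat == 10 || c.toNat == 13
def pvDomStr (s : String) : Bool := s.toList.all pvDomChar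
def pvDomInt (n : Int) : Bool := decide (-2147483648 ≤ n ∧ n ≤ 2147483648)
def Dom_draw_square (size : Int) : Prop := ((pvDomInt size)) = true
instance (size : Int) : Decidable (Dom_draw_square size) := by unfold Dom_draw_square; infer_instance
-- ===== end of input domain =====

-- B builds every row uniformly by its position and joins with '\n'; simpler than A's
-- small-size special cases plus interior-only loop and final top/bottom concatenation.

-- ===== PORT A =====
def draw_square (size : Int) : String :=
  let box : List Char := []
  if size = 0 then String.ofList box
  else if size = 1 then "#"
  else if size = 2 then "##\n##"
  else if size > 2 then
    let box := (PySem.List.pyRange 3 (size + 1) 1).foldl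
      (fun acc _ => acc ++ (['#'] ++ PySem.List.pyRepeat [' '] (size - 2) ++ ['#', '\n'])) box
    String.ofList (PySem.List.pyRepeat ['#'] size ++ ['\n'] ++ box ++ PySem.List.pyRepeat ['#'] size)
  else String.ofList box

-- ===== PORT B =====
def draw_square_alt (size : Int) : String :=
  String.ofList (PySem.Chars.join ['\n'] ((PySem.List.pyRange 0 size 1).map (fun i =>
    if i = 0 ∨ i = size - 1 then PySem.List.pyRepeat ['#'] size
    else ['#'] ++ PySem.List.pyRepeat [' '] (size - 2) ++ ['#'])))

-- ===== PRECONDITION & SPEC =====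
def Spec_draw_square (size : Int) (out : String) : Prop := out = draw_square_alt size
instance (size : Int) (out : String) : Decidable (Spec_draw_square size out) := by unfold Spec_draw_square; infer_instance

-- ===== CLAIM (what is proved, stated in full; the proofs are below) =====
def Claim_equal_draw_square : Prop := ∀ (size : Int), Dom_draw_square size → Spec_draw_square size (draw_square size)

-- ===== LEMMAS AND PROOFS =====

-- A's loop appends the same constant chunk once per iteration.
theorem foldl_append_const {α : Type} (c : List Char) :
    ∀ (l : List α) (acc : List Char),
      l.foldl (fun a _ => a ++ c) acc = acc ++ (List.replicate l.length c).flatten := by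
  intro l
  induction l with
  | nil => simp
  | cons x t ih => intro acc; simp [List.foldl_cons, ih, List.replicate_succ]

-- joining (head :: k interior rows :: last) with '\n'.
theorem join_replicate_mid (mid top : List Char) :
    ∀ (k : Nat) (head : List Char),
      PySem.Chars.join ['\n'] (head :: (List.replicate k mid ++ [top]))
        = head ++ ['\n'] ++ ((List.replicate k (mid ++ ['\n'])).flatten ++ top) := by
  intro k
  induction k with
  | zero =>
      intro head
      simp [PySem.Chars.join_cons_cons, PySem.Chars.join_singleton]
  | succ k ih =>
      intro head
      simp only [List.replicate_succ, List.cons_append, PySem.Chars.join_cons_cons, ih,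
        List.flatten_cons]
      simp

theorem draw_square_eq_big (size : Int) (h : 2 < size) :
    draw_square size = draw_square_alt size := by
  have h0 : size ≠ 0 := by omega
  have h1 : size ≠ 1 := by omega
  have h2 : size ≠ 2 := by omega
  have rows :
      (PySem.List.pyRange 0 size 1).map (fun i =>
          if i = 0 ∨ i = size - 1 then PySem.List.pyRepeat ['#'] size
          else ['#'] ++ PySem.List.pyRepeat [' '] (size - 2) ++ ['#'])
        = PySem.List.pyRepeat ['#'] size ::
            (List.replicate (size - 2).toNat
              (['#'] ++ PySem.List.pyRepeat [' '] (size - 2) ++ ['#'])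
             ++ [PySem.List.pyRepeat ['#'] size]) := by
    rw [PySem.List.pyRange_one_append 0 1 size (by omega) (by omega),
        PySem.List.pyRange_one_append 1 (size - 1) size (by omega) (by omega)]
    have hs1 : PySem.List.pyRange 0 1 1 = [0] := PySem.List.pyRange_one_singleton 0
    have hs2 : PySem.List.pyRange (size - 1) size 1 = [size - 1] := by
      have := PySem.List.pyRange_one_singleton (size - 1)
      simpa [show size - 1 + 1 = size by ring] using this
    have hmid :
        (PySem.List.pyRange 1 (size - 1) 1).map (fun i =>
            if i = 0 ∨ i = size - 1 then PySem.List.pyRepeat ['#'] size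
            else ['#'] ++ PySem.List.pyRepeat [' '] (size - 2) ++ ['#'])
          = List.replicate (size - 2).toNat
              (['#'] ++ PySem.List.pyRepeat [' '] (size - 2) ++ ['#']) := by
      rw [List.map_congr_left (g := fun _ =>
            ['#'] ++ PySem.List.pyRepeat [' '] (size - 2) ++ ['#'])]
      · rw [List.map_const']
        congr 1
        rw [PySem.List.length_pyRange_one]
        omega
      · intro x hx
        rw [PySem.List.mem_pyRange_one] at hx
        have : ¬ (x = 0 ∨ x = size - 1) := by omega
        simp [this]
    simp only [List.map_append, hs1, hs2, hmid, List.map_cons, List.map_nil]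
    have hne : ¬ ((size : Int) - 1 = 0) := by omega
    simp [hne]
  unfold draw_square draw_square_alt
  simp only [h0, h1, h2, h, if_false, rows]
  rw [join_replicate_mid]
  rw [foldl_append_const]
  rw [PySem.List.length_pyRange_one]
  have : (size + 1 - 3).toNat = (size - 2).toNat := by omega
  rw [this]
  simp

-- ===== VERDICT (by name: the statement is the Claim_ definition above) =====
theorem draw_square_spec : Claim_equal_draw_square := by
  intro size _
  show draw_square size = draw_square_alt size
  by_cases hbig : 2 < size
  · exact draw_square_eq_big size hbig
  · rcases (by omega : size = 0 ∨ size = 1 ∨ size = 2 ∨ size < 0) with h | h | h | h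
    · subst h; decide
    · subst h; decide
    · subst h; decide
    · have h0 : size ≠ 0 := by omega
      have h1 : size ≠ 1 := by omega
      have h2 : size ≠ 2 := by omega
      have h3 : ¬ (2 : Int) < size := by omega
      have hr : PySem.List.pyRange 0 size 1 = [] :=
        PySem.List.pyRange_one_eq_nil (by omega)
      unfold draw_square draw_square_alt
      simp [h0, h1, h2, h3, hr, PySem.Chars.join_nil]
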